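-- pv_equiv track=rewrite | github.com/h4x0r/docx-mcp | docx_mcp/document/tracks.py | _normalize_ws
-- ===== SOURCE A (Python) =====
-- def _normalize_ws(text: str) -> tuple[str, list[int]]:
--     """Collapse consecutive whitespace runs to a single space.
--
--     Returns ``(norm_text, orig_idx)`` where ``orig_idx[i]`` is the position in
--     *text* that corresponds to position *i* in *norm_text*.
--     """
--     result: list[str] = []
--     orig_idx: list[int] = []
--     in_space = False
--     for i, ch in enumerate(text):
--         if ch in " \t\r\n":
--             if not in_space:
--                 result.append(" ")
--                 orig_idx.append(i)
--             in_space = True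
--         else:
--             result.append(ch)
--             orig_idx.append(i)
--             in_space = False
--     return "".join(result), orig_idx
-- ===== SOURCE B (Python) =====
-- def _normalize_ws(text: str) -> tuple[str, list[int]]:
--     """Collapse consecutive whitespace runs to a single space.
--
--     Staged, stateless passes: compute a whitespace flag per character, shift
--     it to get each character's predecessor flag, then keep exactly the
--     positions whose character is non-whitespace or whose predecessor is not
--     whitespace; no scan state is carried.
--     """
--     ws = " \t\r\n"
--     flags = [ch in ws for ch in text]
--     prev = [False] + flags[:-1]
--     kept = [(i, ch) for i, (ch, p) in enumerate(zip(text, prev))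
--             if ch not in ws or not p]
--     norm = "".join(" " if ch in ws else ch for _, ch in kept)
--     return norm, [i for i, _ in kept]
-- ===== Notes on version B (the rewrite author's own statement) =====
-- stated objective: alternative
-- what changed: Replaces A's single stateful scan carrying an in_space flag by staged stateless passes: a per-character whitespace-flag list, a shifted predecessor-flag list, a filter keeping positions whose char is non-whitespace or whose predecessor is not whitespace, then a join/map over the kept pairs.
import Mathlib
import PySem

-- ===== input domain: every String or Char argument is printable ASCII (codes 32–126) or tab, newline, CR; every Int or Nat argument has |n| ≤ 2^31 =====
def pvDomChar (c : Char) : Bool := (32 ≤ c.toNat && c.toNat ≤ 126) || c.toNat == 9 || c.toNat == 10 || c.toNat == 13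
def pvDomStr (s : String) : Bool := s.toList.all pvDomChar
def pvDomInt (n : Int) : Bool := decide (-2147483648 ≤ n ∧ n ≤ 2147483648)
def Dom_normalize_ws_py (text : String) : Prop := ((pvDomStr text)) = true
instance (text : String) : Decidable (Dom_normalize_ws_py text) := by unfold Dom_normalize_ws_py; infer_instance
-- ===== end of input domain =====

-- B replaces A's stateful scan (in_space flag) by staged stateless passes:
-- flag list, shifted predecessor-flag list, filter, then map (objective: alternative).

-- shared character class: ch in " \t\r\n"
def pvIsWS (c : Char) : Bool := c = ' ' || c = '\t' || c = '\r' || c = '\n'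

-- ===== PORT A =====
-- for i, ch in enumerate(text): state = (result, orig_idx, in_space)
def normalize_ws_py (text : String) : String × List Int :=
  let st := (PySem.List.enumerate text.toList).foldl
    (fun (st : List Char × List Int × Bool) (p : Int × Char) =>
      let result := st.1; let orig_idx := st.2.1; let in_space := st.2.2
      let i := p.1; let ch := p.2
      if pvIsWS ch then
        if !in_space then (result ++ [' '], orig_idx ++ [i], true)
        else (result, orig_idx, true)
      else (result ++ [ch], orig_idx ++ [i], false))
    ([], [], false)
  (String.mk st.1, st.2.1)

-- ===== PORT B =====
-- flags = [ch in ws for ch in text]; prev = [False] + flags[:-1];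
-- kept = [(i, ch) for i,(ch,p) in enumerate(zip(text, prev)) if ch not in ws or not p]
def normalize_ws_py_alt (text : String) : String × List Int :=
  let l := text.toList
  let flags := l.map pvIsWS
  let prev := false :: flags.dropLast
  let kept := (PySem.List.enumerate (l.zip prev)).filter
      (fun q => !pvIsWS q.2.1 || !q.2.2)
  (String.mk (kept.map (fun q => if pvIsWS q.2.1 then ' ' else q.2.1)),
   kept.map Prod.fst)

-- ===== PRECONDITION & SPEC =====
def Spec_normalize_ws_py (text : String) (out : String × List Int) : Prop := out = normalize_ws_py_alt text
instance (text : String) (out : String × List Int) : Decidable (Spec_normalize_ws_py text out) := by unfold Spec_normalize_ws_py; infer_instance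

-- ===== CLAIM (what is proved, stated in full; the proofs are below) =====
def Claim_equal_normalize_ws_py : Prop := ∀ (text : String), Dom_normalize_ws_py text → Spec_normalize_ws_py text (normalize_ws_py text)

-- ===== LEMMAS AND PROOFS =====

-- recursive characterisation of A's per-character loop (flag as parameter)
def pvARec : List Char → Int → Bool → List Char × List Int
  | [], _, _ => ([], [])
  | c :: rest, i, insp =>
    if pvIsWS c then
      let pr := pvARec rest (i + 1) true
      if insp then pr else (' ' :: pr.1, i :: pr.2)
    else
      let pr := pvARec rest (i + 1) false
      (c :: pr.1, i :: pr.2)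

-- A's foldl from any state appends exactly pvARec's output
theorem pvA_foldl (l : List Char) : ∀ (i : Int) (r : List Char) (o : List Int) (b : Bool),
    ∃ b', (PySem.List.enumerate l i).foldl
      (fun (st : List Char × List Int × Bool) (p : Int × Char) =>
        let result := st.1; let orig_idx := st.2.1; let in_space := st.2.2
        let i := p.1; let ch := p.2
        if pvIsWS ch then
          if !in_space then (result ++ [' '], orig_idx ++ [i], true)
          else (result, orig_idx, true)
        else (result ++ [ch], orig_idx ++ [i], false))
      (r, o, b)
      = (r ++ (pvARec l i b).1, o ++ (pvARec l i b).2, b') := by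
  induction l with
  | nil => intro i r o b; exact ⟨b, by simp [pvARec, PySem.List.enumerate_nil]⟩
  | cons c rest ih =>
    intro i r o b
    rw [PySem.List.enumerate_cons, List.foldl_cons]
    by_cases hw : pvIsWS c
    · cases b with
      | false =>
        obtain ⟨b', hb⟩ := ih (i + 1) (r ++ [' ']) (o ++ [i]) true
        refine ⟨b', ?_⟩
        simp only [pvARec, hw, if_true, if_neg Bool.false_ne_true]
        simpa using hb
      | true =>
        obtain ⟨b', hb⟩ := ih (i + 1) r o true
        refine ⟨b', ?_⟩
        simp only [pvARec, hw, if_true]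
        simpa using hb
    · obtain ⟨b', hb⟩ := ih (i + 1) (r ++ [c]) (o ++ [i]) false
      refine ⟨b', ?_⟩
      simp only [pvARec, hw]
      simpa [hw] using hb

-- the zip of a list with its shifted flag list unfolds one pair at a time
theorem pvZip_prevs (c : Char) (rest : List Char) (p : Bool) :
    (c :: rest).zip (p :: ((c :: rest).map pvIsWS).dropLast)
      = (c, p) :: rest.zip (pvIsWS c :: (rest.map pvIsWS).dropLast) := by
  cases rest <;> simp

-- A's recursive scan equals B's filter/map over the predecessor-flag zip
theorem pvARec_eq_filter (l : List Char) : ∀ (p : Bool) (i : Int),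
    pvARec l i p =
      (((PySem.List.enumerate (l.zip (p :: (l.map pvIsWS).dropLast)) i).filter
          (fun q => !pvIsWS q.2.1 || !q.2.2)).map
          (fun q => if pvIsWS q.2.1 then ' ' else q.2.1),
       ((PySem.List.enumerate (l.zip (p :: (l.map pvIsWS).dropLast)) i).filter
          (fun q => !pvIsWS q.2.1 || !q.2.2)).map Prod.fst) := by
  induction l with
  | nil => intro p i; simp [pvARec, PySem.List.enumerate_nil]
  | cons c rest ih =>
    intro p i
    rw [pvZip_prevs, PySem.List.enumerate_cons]
    by_cases hw : pvIsWS c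
    · cases p with
      | false =>
        rw [pvARec]
        simp only [hw, if_true, if_neg Bool.false_ne_true, ih true (i + 1)]
        simp [hw]
      | true =>
        rw [pvARec]
        simp only [hw, if_true, ih true (i + 1)]
        simp [hw]
    · rw [pvARec]
      simp only [hw, ih false (i + 1)]
      simp [hw]

-- ===== VERDICT (by name: the statement is the Claim_ definition above) =====
theorem normalize_ws_py_spec : Claim_equal_normalize_ws_py := by
  intro text _
  unfold Spec_normalize_ws_py normalize_ws_py normalize_ws_py_alt
  obtain ⟨b', hb⟩ := pvA_foldl text.toList 0 [] [] false
  rw [hb]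
  have h := pvARec_eq_filter text.toList false 0
  simp only [List.nil_append]
  rw [h]
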